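-- pv_equiv track=rewrite | github.com/Mani-Selvam/NeoApp | server/services/pythonWebScraper.py | _is_nav_or_junk
-- ===== SOURCE A (Python) =====
-- def _is_nav_or_junk(text):
--     """Check if text is navigation or junk content"""
--     lower = text.lower()
--
--     junk_patterns = [
--         'click here', 'read more', 'learn more', 'view more',
--         'home', 'about', 'contact', 'menu', 'link', 'follow',
--         'subscribe', 'download', 'visit', 'go to', 'made by',
--         'copyright', 'all rights', 'privacy policy', 'terms',
--         'call us', 'contact us', 'get in touch', 'appointment'
--     ]
--
--     return any(pattern in lower for pattern in junk_patterns)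
-- ===== SOURCE B (Python) =====
-- # B: single left-to-right scan with a first-character dispatch table: at each
-- # position only the patterns starting with the current character are tested
-- # (as tails of the remaining suffix), instead of one full substring search
-- # per pattern over the whole text as in A.
--
-- _DISPATCH = {
--     'c': ('lick here', 'ontact', 'opyright', 'all us', 'ontact us'),
--     'r': ('ead more',),
--     'l': ('earn more', 'ink'),
--     'v': ('iew more', 'isit'),
--     'h': ('ome',),
--     'a': ('bout', 'll rights', 'ppointment'),
--     'm': ('enu', 'ade by'),
--     'f': ('ollow',),
--     's': ('ubscribe',),
--     'd': ('ownload',),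
--     'g': ('o to', 'et in touch'),
--     'p': ('rivacy policy',),
--     't': ('erms',),
-- }
--
--
-- def _is_nav_or_junk(text):
--     lower = text.lower()
--     for i, c in enumerate(lower):
--         for tail in _DISPATCH.get(c, ()):
--             if lower.startswith(tail, i + 1):
--                 return True
--     return False
-- ===== Notes on version B (the rewrite author's own statement) =====
-- stated objective: alternative
-- what changed: B replaces A's per-pattern full substring searches by a single left-to-right scan of the lowercased text with a precomputed first-character dispatch table: at each position only the patterns starting with the current character are prefix-tested on the remaining suffix.
import Mathlib
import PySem

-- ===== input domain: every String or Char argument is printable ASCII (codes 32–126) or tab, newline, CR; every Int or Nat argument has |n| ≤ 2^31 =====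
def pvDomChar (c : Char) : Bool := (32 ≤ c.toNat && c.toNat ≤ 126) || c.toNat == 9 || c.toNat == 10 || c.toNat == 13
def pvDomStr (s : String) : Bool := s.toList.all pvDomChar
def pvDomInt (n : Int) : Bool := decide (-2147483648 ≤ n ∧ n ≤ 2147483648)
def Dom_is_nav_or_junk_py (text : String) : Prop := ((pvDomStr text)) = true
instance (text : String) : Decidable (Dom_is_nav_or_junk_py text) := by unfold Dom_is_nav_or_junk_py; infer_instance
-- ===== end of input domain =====

-- B replaces A's per-pattern substring searches by ONE left-to-right scan with a
-- first-character dispatch table (only patterns starting with the current character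
-- are prefix-tested on the remaining suffix); objective: alternative.

-- ===== PORT A =====
def is_nav_or_junk_py (text : String) : Bool :=
  let lower := PySem.Str.lower text
  let junk_patterns : List String :=
    ["click here", "read more", "learn more", "view more",
     "home", "about", "contact", "menu", "link", "follow",
     "subscribe", "download", "visit", "go to", "made by",
     "copyright", "all rights", "privacy policy", "terms",
     "call us", "contact us", "get in touch", "appointment"]
  junk_patterns.any (fun pattern => PySem.Str.isIn pattern lower)

-- ===== PORT B =====
-- the module-level dispatch dict of Source B: first character ↦ tails of the patterns
def junkDispatch : List (Char × List (List Char)) :=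
  [('c', ["lick here".toList, "ontact".toList, "opyright".toList, "all us".toList, "ontact us".toList]),
   ('r', ["ead more".toList]),
   ('l', ["earn more".toList, "ink".toList]),
   ('v', ["iew more".toList, "isit".toList]),
   ('h', ["ome".toList]),
   ('a', ["bout".toList, "ll rights".toList, "ppointment".toList]),
   ('m', ["enu".toList, "ade by".toList]),
   ('f', ["ollow".toList]),
   ('s', ["ubscribe".toList]),
   ('d', ["ownload".toList]),
   ('g', ["o to".toList, "et in touch".toList]),
   ('p', ["rivacy policy".toList]),
   ('t', ["erms".toList])]

-- Source B's position loop 'for i, c in enumerate(lower)' as recursion over the suffixes;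
-- _DISPATCH.get(c, ()) is the find?-lookup, startswith(tail, i+1) tests tail on the rest
def scanJunk : List Char → Bool
  | [] => false
  | c :: rest =>
      (((junkDispatch.find? (fun e => e.1 == c)).map Prod.snd).getD []).any
        (fun tail => PySem.Chars.startswith rest tail)
      || scanJunk rest

def is_nav_or_junk_py_alt (text : String) : Bool :=
  scanJunk (PySem.Chars.lower text.toList)

-- ===== PRECONDITION & SPEC =====
def Spec_is_nav_or_junk_py (text : String) (out : Bool) : Prop := out = is_nav_or_junk_py_alt text
instance (text : String) (out : Bool) : Decidable (Spec_is_nav_or_junk_py text out) := by unfold Spec_is_nav_or_junk_py; infer_instance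

-- ===== CLAIM (what is proved, stated in full; the proofs are below) =====
def Claim_equal_is_nav_or_junk_py : Prop := ∀ (text : String), Dom_is_nav_or_junk_py text → Spec_is_nav_or_junk_py text (is_nav_or_junk_py text)

-- ===== LEMMAS AND PROOFS =====

-- A's pattern list on the character level (proof-side helper)
def patsChars : List (List Char) :=
  ["click here".toList, "read more".toList, "learn more".toList, "view more".toList,
   "home".toList, "about".toList, "contact".toList, "menu".toList, "link".toList,
   "follow".toList, "subscribe".toList, "download".toList, "visit".toList,
   "go to".toList, "made by".toList, "copyright".toList, "all rights".toList,
   "privacy policy".toList, "terms".toList, "call us".toList, "contact us".toList,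
   "get in touch".toList, "appointment".toList]

-- the lookup in an association list with distinct keys, as an existential
lemma findAny_eq {α : Type} (d : List (Char × List α)) (hnd : (d.map Prod.fst).Nodup)
    (c : Char) (f : α → Bool) :
    ((((d.find? (fun e => e.1 == c)).map Prod.snd).getD []).any f = true) ↔
      ∃ e ∈ d, e.1 = c ∧ ∃ t ∈ e.2, f t = true := by
  induction d with
  | nil => simp
  | cons e d' ih =>
      obtain ⟨hk, hnd'⟩ := List.nodup_cons.mp hnd
      by_cases hc : e.1 = c
      · have hfind : (e :: d').find? (fun e => e.1 == c) = some e :=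
          List.find?_cons_of_pos (by simpa using hc)
        rw [hfind]
        simp only [Option.map_some, Option.getD_some, List.any_eq_true, List.mem_cons]
        constructor
        · rintro ⟨t, ht, hf⟩; exact ⟨e, Or.inl rfl, hc, t, ht, hf⟩
        · rintro ⟨e', he', hce', t, ht, hf⟩
          rcases he' with rfl | he'
          · exact ⟨t, ht, hf⟩
          · have hkeq : e.1 = e'.1 := by rw [hc, hce']
            exact absurd (hkeq ▸ List.mem_map_of_mem he' (f := Prod.fst)) hk
      · have hfind : (e :: d').find? (fun e => e.1 == c) = d'.find? (fun e => e.1 == c) :=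
          List.find?_cons_of_neg (by simpa using hc)
        rw [hfind, ih hnd']
        constructor
        · rintro ⟨e', he', h⟩; exact ⟨e', List.mem_cons_of_mem _ he', h⟩
        · rintro ⟨e', he', hce', h⟩
          rcases List.mem_cons.mp he' with rfl | he'
          · exact absurd hce' hc
          · exact ⟨e', he', hce', h⟩

lemma junkDispatch_keys_nodup : (junkDispatch.map Prod.fst).Nodup := by decide

-- the dispatch table, flattened back to head::tail patterns
def junkFlat : List (List Char) := junkDispatch.flatMap (fun e => e.2.map (e.1 :: ·))

-- flattening is the same finite set of patterns as A's list (checked by the kernel)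
lemma junkFlat_perm : junkFlat.Perm patsChars := by decide

-- the dispatch table is exactly A's pattern list, split head/tail
lemma dispatch_iff_pats (c : Char) (tail : List Char) :
    (∃ e ∈ junkDispatch, e.1 = c ∧ tail ∈ e.2) ↔ (c :: tail) ∈ patsChars := by
  rw [← junkFlat_perm.mem_iff]
  simp only [junkFlat, List.mem_flatMap, List.mem_map]
  constructor
  · rintro ⟨e, he, rfl, ht⟩
    exact ⟨e, he, tail, ht, rfl⟩
  · rintro ⟨e, he, t, ht, heq⟩
    obtain ⟨h1, h2⟩ := List.cons.inj heq
    exact ⟨e, he, h1, h2 ▸ ht⟩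

-- characterisation of B's scan: some pattern (head :: tail) heads some suffix of l
lemma scanJunk_iff (l : List Char) :
    scanJunk l = true ↔ ∃ c tail, (c :: tail) ∈ patsChars ∧ ∃ rest, (c :: rest) <:+ l ∧ tail <+: rest := by
  induction l with
  | nil =>
      simp only [scanJunk]
      constructor
      · intro h; exact (Bool.false_ne_true h).elim
      · rintro ⟨c, tail, -, rest, hsuf, -⟩
        exact absurd (List.suffix_nil.mp hsuf) (List.cons_ne_nil c rest)
  | cons c rest ih =>
      simp only [scanJunk, Bool.or_eq_true, ih,
        findAny_eq junkDispatch junkDispatch_keys_nodup]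
      constructor
      · rintro (⟨e, he, hc, t, ht, hsw⟩ | ⟨c', t, hp, r, hsuf, hpre⟩)
        · exact ⟨c, t, (dispatch_iff_pats c t).mp ⟨e, he, hc, ht⟩, rest,
            List.suffix_refl _, (PySem.Chars.startswith_iff _ _).mp hsw⟩
        · exact ⟨c', t, hp, r, hsuf.trans (List.suffix_cons c rest), hpre⟩
      · rintro ⟨c', t, hp, r, hsuf, hpre⟩
        rcases List.suffix_cons_iff.mp hsuf with heq | hsuf'
        · obtain ⟨h1, h2⟩ := List.cons.inj heq
          subst h1; subst h2
          obtain ⟨e, he, hc, ht⟩ := (dispatch_iff_pats c' t).mpr hp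
          exact Or.inl ⟨e, he, hc, t, ht, (PySem.Chars.startswith_iff _ _).mpr hpre⟩
        · exact Or.inr ⟨c', t, hp, r, hsuf', hpre⟩

-- every pattern of A is nonempty
lemma patsChars_ne_nil : ∀ p ∈ patsChars, p ≠ [] := by decide

-- the core equality on the character-list level
lemma any_isIn_eq_scanJunk (l : List Char) :
    (patsChars.any fun p => PySem.Chars.isIn p l) = scanJunk l := by
  rcases Bool.eq_false_or_eq_true (scanJunk l) with h | h
  · rw [h]
    obtain ⟨c, tail, hp, rest, hsuf, hpre⟩ := (scanJunk_iff l).mp h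
    rw [List.any_eq_true]
    refine ⟨c :: tail, hp, ?_⟩
    rw [PySem.Chars.isIn_iff_infix]
    exact List.infix_iff_prefix_suffix.mpr ⟨c :: rest, (List.prefix_cons_inj c).mpr hpre, hsuf⟩
  · rw [h, Bool.eq_false_iff]
    intro hany
    rw [List.any_eq_true] at hany
    obtain ⟨p, hp, hin⟩ := hany
    rw [PySem.Chars.isIn_iff_infix] at hin
    obtain ⟨t, hpre, hsuf⟩ := List.infix_iff_prefix_suffix.mp hin
    obtain ⟨c, pt, rfl⟩ := List.exists_cons_of_ne_nil (patsChars_ne_nil _ hp)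
    obtain ⟨t', rfl⟩ := hpre
    have htrue : scanJunk l = true := by
      rw [scanJunk_iff]
      exact ⟨c, pt, hp, pt ++ t', by simpa using hsuf, ⟨t', rfl⟩⟩
    rw [h] at htrue; cases htrue

-- ===== VERDICT (by name: the statement is the Claim_ definition above) =====
theorem is_nav_or_junk_py_spec : Claim_equal_is_nav_or_junk_py := by
  intro text _
  unfold Spec_is_nav_or_junk_py is_nav_or_junk_py is_nav_or_junk_py_alt
  rw [← any_isIn_eq_scanJunk]
  simp [patsChars, PySem.Str.isIn, PySem.Str.lower]
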